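-- pv_equiv track=rewrite | github.com/atomicrobotmonster/battleship | engine.py | coord_tuple_to_index_tuple
-- ===== SOURCE A (Python) =====
-- def coord_tuple_to_index_tuple(coord_tuple):
--     """Converts a row and column tuple into a 2D array zero-indexed tuple
--
--     :param coord_tuple: tuple of player co-ordinate, e.g. ('A',7)
--     :return: 2D array index tuple, e.g. (0, 6)
--     """
--     digit_domain = 3
--
--     x_ords = list(reversed([ord(c) - 64 for c in list(coord_tuple[0])]))
--
--     x_raised = [(x_ords[i] * (digit_domain ** i))
--                 for i in range(len(x_ords))]
--
--     x = sum(x_raised) - 1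
--     y = int(coord_tuple[1]) - 1
--
--     return (x, y)
-- ===== SOURCE B (Python) =====
-- def coord_tuple_to_index_tuple(coord_tuple):
--     """Converts a row and column tuple into a 2D array zero-indexed tuple"""
--     acc = 0
--     for c in coord_tuple[0]:
--         acc = acc * 3 + (ord(c) - 64)
--     return (acc - 1, int(coord_tuple[1]) - 1)
-- ===== Notes on version B (the rewrite author's own statement) =====
-- stated objective: faster
-- what changed: Replaces the reversed digit list, the per-index power list (recomputing 3**i for every position) and the final sum with a single left-to-right Horner accumulator pass, keeping the original's base-3 weighting.
import Mathlib
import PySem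

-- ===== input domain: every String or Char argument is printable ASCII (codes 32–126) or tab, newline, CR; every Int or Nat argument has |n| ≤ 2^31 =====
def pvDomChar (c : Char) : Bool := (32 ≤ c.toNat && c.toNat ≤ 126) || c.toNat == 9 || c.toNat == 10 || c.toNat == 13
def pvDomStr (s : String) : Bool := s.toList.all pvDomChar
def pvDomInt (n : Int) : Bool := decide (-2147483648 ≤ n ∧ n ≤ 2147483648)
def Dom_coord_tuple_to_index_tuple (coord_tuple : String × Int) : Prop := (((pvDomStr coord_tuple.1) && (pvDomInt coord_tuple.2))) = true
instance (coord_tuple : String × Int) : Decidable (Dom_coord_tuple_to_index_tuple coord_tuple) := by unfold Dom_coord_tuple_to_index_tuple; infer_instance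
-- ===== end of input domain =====

-- B replaces the reversed digit list, power list and sum with one Horner accumulator pass (simpler).


-- ===== PORT A =====
-- coord_tuple[1] is an int, so int(coord_tuple[1]) is the identity.
def coord_tuple_to_index_tuple (coord_tuple : String × Int) : Int × Int :=
  let x_ords : List Int := (coord_tuple.1.toList.map (fun c => (c.toNat : Int) - 64)).reverse
  let x_raised : List Int := (List.range x_ords.length).map (fun i => x_ords.getD i 0 * 3 ^ i)
  let x : Int := x_raised.sum - 1
  let y : Int := coord_tuple.2 - 1
  (x, y)

-- ===== PORT B =====
def coord_tuple_to_index_tuple_alt (coord_tuple : String × Int) : Int × Int :=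
  let acc : Int := coord_tuple.1.toList.foldl (fun a c => a * 3 + ((c.toNat : Int) - 64)) 0
  (acc - 1, coord_tuple.2 - 1)

-- ===== PRECONDITION & SPEC =====
def Spec_coord_tuple_to_index_tuple (coord_tuple : String × Int) (out : Int × Int) : Prop := out = coord_tuple_to_index_tuple_alt coord_tuple
instance (coord_tuple : String × Int) (out : Int × Int) : Decidable (Spec_coord_tuple_to_index_tuple coord_tuple out) := by unfold Spec_coord_tuple_to_index_tuple; infer_instance

-- ===== CLAIM (what is proved, stated in full; the proofs are below) =====
def Claim_equal_coord_tuple_to_index_tuple : Prop := ∀ (coord_tuple : String × Int), Dom_coord_tuple_to_index_tuple coord_tuple → Spec_coord_tuple_to_index_tuple coord_tuple (coord_tuple_to_index_tuple coord_tuple)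

-- ===== LEMMAS AND PROOFS =====

-- A's positional sum over a list of base-3 digits (least significant first)
def pvPosSum (t : List Int) : Int := ((List.range t.length).map (fun i => t.getD i 0 * 3 ^ i)).sum

theorem pvPosSum_cons (v : Int) (t : List Int) : pvPosSum (v :: t) = v + 3 * pvPosSum t := by
  unfold pvPosSum
  rw [List.length_cons, List.range_succ_eq_map, List.map_cons, List.map_map, List.sum_cons,
    ← List.sum_map_mul_left]
  congr 1
  · simp [List.getD]
  · apply congrArg List.sum
    apply List.map_congr_left
    intro i _
    simp only [Function.comp_apply, List.getD, List.getElem?_cons_succ, pow_succ]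
    ring

theorem pvHorner_eq (l : List Int) :
    l.foldl (fun a v => a * 3 + v) 0 = pvPosSum l.reverse := by
  induction l using List.reverseRecOn with
  | nil => simp [pvPosSum]
  | append_singleton t v ih =>
      rw [List.foldl_append, List.foldl_cons, List.foldl_nil, ih,
        List.reverse_append, List.reverse_singleton, List.singleton_append,
        pvPosSum_cons]
      ring

-- ===== VERDICT (by name: the statement is the Claim_ definition above) =====
theorem coord_tuple_to_index_tuple_spec : Claim_equal_coord_tuple_to_index_tuple := by
  intro ct _
  show _ = _
  unfold coord_tuple_to_index_tuple coord_tuple_to_index_tuple_alt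
  have h := pvHorner_eq (ct.1.toList.map (fun c => (c.toNat : Int) - 64))
  simp only [pvPosSum] at h
  simp only [List.foldl_map] at h
  simp [h]
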